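-- pv_equiv track=rewrite | github.com/cracrazjf/PsychAI | psychai/data/multimodal.py | get_multimodal_stats
-- ===== SOURCE A (Python) =====
-- from typing import List, Dict, Any, Optional
--
-- def get_multimodal_stats(dataset: List[Dict[str, Any]]) -> Dict[str, Any]:
--     """
--     Get statistics about a multimodal dataset
--
--     Args:
--         dataset: Multimodal dataset
--
--     Returns:
--         Dictionary with statistics
--     """
--     stats = {
--         "total_samples": len(dataset),
--         "text_samples": 0,
--         "image_samples": 0,
--         "audio_samples": 0,
--         "multimodal_samples": 0
--     }
--
--     for sample in dataset:
--         modalities = []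
--
--         if "text" in sample:
--             stats["text_samples"] += 1
--             modalities.append("text")
--
--         if "image_path" in sample:
--             stats["image_samples"] += 1
--             modalities.append("image")
--
--         if "audio_path" in sample:
--             stats["audio_samples"] += 1
--             modalities.append("audio")
--
--         if len(modalities) > 1:
--             stats["multimodal_samples"] += 1
--
--     return stats
-- ===== SOURCE B (Python) =====
-- def get_multimodal_stats(dataset):
--     """Same stats via independent passes: one count per modality, and a
--     re-derived multimodal predicate (more than one of the three keys present)."""
--     text = sum(1 for s in dataset if "text" in s)
--     image = sum(1 for s in dataset if "image_path" in s)
--     audio = sum(1 for s in dataset if "audio_path" in s)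
--     multi = sum(1 for s in dataset
--                 if ("text" in s) + ("image_path" in s) + ("audio_path" in s) > 1)
--     return {
--         "total_samples": len(dataset),
--         "text_samples": text,
--         "image_samples": image,
--         "audio_samples": audio,
--         "multimodal_samples": multi,
--     }
-- ===== Notes on version B (the rewrite author's own statement) =====
-- stated objective: idiomatic
-- what changed: Replaces the single fused loop that mutates a stats dict and builds a per-sample modalities list with four independent counting passes (one per stat) and a re-derived 'more than one modality present' predicate, assembling the dict once at the end.
import Mathlib
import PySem

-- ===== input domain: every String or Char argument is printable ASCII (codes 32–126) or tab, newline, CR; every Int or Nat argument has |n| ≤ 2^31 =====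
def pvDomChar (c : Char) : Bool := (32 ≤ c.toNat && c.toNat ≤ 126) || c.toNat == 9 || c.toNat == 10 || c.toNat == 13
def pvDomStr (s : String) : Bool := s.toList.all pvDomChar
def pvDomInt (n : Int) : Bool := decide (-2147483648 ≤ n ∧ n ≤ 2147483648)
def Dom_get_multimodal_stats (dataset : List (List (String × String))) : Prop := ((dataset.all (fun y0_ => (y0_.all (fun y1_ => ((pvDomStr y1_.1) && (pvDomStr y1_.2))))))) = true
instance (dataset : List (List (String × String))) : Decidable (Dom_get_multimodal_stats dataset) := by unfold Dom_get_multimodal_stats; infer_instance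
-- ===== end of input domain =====

-- B replaces A's single fused dict-mutating loop by four independent counting passes (idiomatic; same O(n) cost).

-- ===== PORT A =====
-- A's loop body, step for step: build the per-sample modalities list while bumping the dict's counters
def pvStepA (stats : PySem.Dict String Int) (sample : List (String × String)) : PySem.Dict String Int :=
  let modalities : List String := []
  let p1 := if (PySem.Dict.mk sample).contains "text" then
      (stats.modify "text_samples" 0 (· + 1), modalities ++ ["text"])
    else (stats, modalities)
  let p2 := if (PySem.Dict.mk sample).contains "image_path" then
      (p1.1.modify "image_samples" 0 (· + 1), p1.2 ++ ["image"])
    else p1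
  let p3 := if (PySem.Dict.mk sample).contains "audio_path" then
      (p2.1.modify "audio_samples" 0 (· + 1), p2.2 ++ ["audio"])
    else p2
  if p3.2.length > 1 then p3.1.modify "multimodal_samples" 0 (· + 1) else p3.1

-- literal transliteration of A: build the stats dict, then one loop that mutates it per sample
def get_multimodal_stats (dataset : List (List (String × String))) : List (String × Int) :=
  let stats : PySem.Dict String Int := PySem.Dict.ofList
    [("total_samples", (dataset.length : Int)), ("text_samples", 0), ("image_samples", 0),
     ("audio_samples", 0), ("multimodal_samples", 0)]
  let stats := dataset.foldl pvStepA stats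
  stats.items

-- ===== PORT B =====
-- literal transliteration of B: one independent count per statistic
def get_multimodal_stats_alt (dataset : List (List (String × String))) : List (String × Int) :=
  let hasT : List (String × String) → Bool := fun s => (PySem.Dict.mk s).contains "text"
  let hasI : List (String × String) → Bool := fun s => (PySem.Dict.mk s).contains "image_path"
  let hasA : List (String × String) → Bool := fun s => (PySem.Dict.mk s).contains "audio_path"
  let text : Int := (dataset.countP hasT : Int)
  let image : Int := (dataset.countP hasI : Int)
  let audio : Int := (dataset.countP hasA : Int)
  let multi : Int := (dataset.countP (fun s =>
    (cond (hasT s) 1 0) + (cond (hasI s) 1 0) + (cond (hasA s) 1 0) > (1 : Int)) : Int)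
  [("total_samples", (dataset.length : Int)), ("text_samples", text), ("image_samples", image),
   ("audio_samples", audio), ("multimodal_samples", multi)]

-- ===== PRECONDITION & SPEC =====
def Spec_get_multimodal_stats (dataset : List (List (String × String))) (out : List (String × Int)) : Prop := out = get_multimodal_stats_alt dataset
instance (dataset : List (List (String × String))) (out : List (String × Int)) : Decidable (Spec_get_multimodal_stats dataset out) := by unfold Spec_get_multimodal_stats; infer_instance

-- ===== CLAIM (what is proved, stated in full; the proofs are below) =====
def Claim_equal_get_multimodal_stats : Prop := ∀ (dataset : List (List (String × String))), Dom_get_multimodal_stats dataset → Spec_get_multimodal_stats dataset (get_multimodal_stats dataset)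

-- ===== LEMMAS AND PROOFS =====

-- the literal stats dict A maintains, parameterised by its five values
def pvMk5 (l t i a m : Int) : PySem.Dict String Int :=
  PySem.Dict.ofList
    [("total_samples", l), ("text_samples", t), ("image_samples", i),
     ("audio_samples", a), ("multimodal_samples", m)]

theorem pvMk5_items (l t i a m : Int) :
    (pvMk5 l t i a m).items =
      [("total_samples", l), ("text_samples", t), ("image_samples", i),
       ("audio_samples", a), ("multimodal_samples", m)] := rfl

theorem pvMk5_congr (l : Int) {t i a m t' i' a' m' : Int}
    (h1 : t = t') (h2 : i = i') (h3 : a = a') (h4 : m = m') :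
    pvMk5 l t i a m = pvMk5 l t' i' a' m' := by rw [h1, h2, h3, h4]

theorem pvMk5_modify_t (l t i a m : Int) :
    (pvMk5 l t i a m).modify "text_samples" 0 (· + 1) = pvMk5 l (t + 1) i a m := rfl

theorem pvMk5_modify_i (l t i a m : Int) :
    (pvMk5 l t i a m).modify "image_samples" 0 (· + 1) = pvMk5 l t (i + 1) a m := rfl

theorem pvMk5_modify_a (l t i a m : Int) :
    (pvMk5 l t i a m).modify "audio_samples" 0 (· + 1) = pvMk5 l t i (a + 1) m := rfl

theorem pvMk5_modify_m (l t i a m : Int) :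
    (pvMk5 l t i a m).modify "multimodal_samples" 0 (· + 1) = pvMk5 l t i a (m + 1) := rfl

-- A's loop body sends pvMk5 to pvMk5 with the matching counters bumped
theorem pvStep_mk5 (l t i a m : Int) (s : List (String × String)) :
    pvStepA (pvMk5 l t i a m) s =
    pvMk5 l
      (t + cond ((PySem.Dict.mk s).contains "text") 1 0)
      (i + cond ((PySem.Dict.mk s).contains "image_path") 1 0)
      (a + cond ((PySem.Dict.mk s).contains "audio_path") 1 0)
      (m + if (cond ((PySem.Dict.mk s).contains "text") (1:Int) 0)
             + (cond ((PySem.Dict.mk s).contains "image_path") 1 0)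
             + (cond ((PySem.Dict.mk s).contains "audio_path") 1 0) > 1 then 1 else 0) := by
  unfold pvStepA
  cases hT : (PySem.Dict.mk s).contains "text" <;>
  cases hI : (PySem.Dict.mk s).contains "image_path" <;>
  cases hA : (PySem.Dict.mk s).contains "audio_path" <;>
    simp [pvMk5_modify_t, pvMk5_modify_i, pvMk5_modify_a, pvMk5_modify_m]

-- the whole loop, by induction generalising the accumulator values
theorem pvFold_mk5 (ds : List (List (String × String))) (l t i a m : Int) :
    ds.foldl pvStepA (pvMk5 l t i a m) =
    pvMk5 l
      (t + (ds.countP (fun s => (PySem.Dict.mk s).contains "text") : Int))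
      (i + (ds.countP (fun s => (PySem.Dict.mk s).contains "image_path") : Int))
      (a + (ds.countP (fun s => (PySem.Dict.mk s).contains "audio_path") : Int))
      (m + (ds.countP (fun s =>
        (cond ((PySem.Dict.mk s).contains "text") (1:Int) 0)
          + (cond ((PySem.Dict.mk s).contains "image_path") 1 0)
          + (cond ((PySem.Dict.mk s).contains "audio_path") 1 0) > 1) : Int)) := by
  induction ds generalizing t i a m with
  | nil => simp
  | cons hd tl ih =>
    rw [List.foldl_cons, pvStep_mk5, ih]
    simp only [List.countP_cons]
    cases hT : (PySem.Dict.mk hd).contains "text" <;>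
    cases hI : (PySem.Dict.mk hd).contains "image_path" <;>
    cases hA : (PySem.Dict.mk hd).contains "audio_path" <;>
      apply pvMk5_congr <;>
        (simp only [cond_true, cond_false]; push_cast; try norm_num) <;> ring

-- ===== VERDICT (by name: the statement is the Claim_ definition above) =====
theorem get_multimodal_stats_spec : Claim_equal_get_multimodal_stats := by
  intro ds _
  show get_multimodal_stats ds = get_multimodal_stats_alt ds
  show (List.foldl pvStepA (pvMk5 (ds.length : Int) 0 0 0 0) ds).items =
    [("total_samples", (ds.length : Int)),
     ("text_samples", (ds.countP (fun s => (PySem.Dict.mk s).contains "text") : Int)),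
     ("image_samples", (ds.countP (fun s => (PySem.Dict.mk s).contains "image_path") : Int)),
     ("audio_samples", (ds.countP (fun s => (PySem.Dict.mk s).contains "audio_path") : Int)),
     ("multimodal_samples", (ds.countP (fun s =>
        (cond ((PySem.Dict.mk s).contains "text") (1:Int) 0)
          + (cond ((PySem.Dict.mk s).contains "image_path") 1 0)
          + (cond ((PySem.Dict.mk s).contains "audio_path") 1 0) > 1) : Int))]
  rw [pvFold_mk5, pvMk5_items]
  norm_num
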